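-- pv_equiv track=rewrite | github.com/Kamillatemurshoeva/arar-institute-of-oriental-studies-scraper | main.py | slice_object_lines
-- ===== SOURCE A (Python) =====
-- def slice_object_lines(lines):
--     start = None
--     for i, line in enumerate(lines):
--         if line == "Object":
--             start = i
--             break
--
--     if start is None:
--         return lines
--
--     stop_markers = {
--         "Recently viewed",
--         "Objects",
--         "Collections",
--         "Similar",
--     }
--
--     result = []
--     for line in lines[start:]:
--         if line in stop_markers and len(result) > 10:
--             break
--         result.append(line)
--
--     return result
-- ===== SOURCE B (Python) =====
-- def slice_object_lines(lines):
--     start = next((i for i, line in enumerate(lines) if line == "Object"), None)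
--     if start is None:
--         return lines
--     stop_markers = {"Recently viewed", "Objects", "Collections", "Similar"}
--     for j in range(start + 11, len(lines)):
--         if lines[j] in stop_markers:
--             return lines[start:j]
--     return lines[start:]
-- ===== Notes on version B (the rewrite author's own statement) =====
-- stated objective: simpler
-- what changed: Replaces the element-by-element append loop with a boundary-index computation (first stop marker at absolute index >= start+11) followed by a single slice.
import Mathlib
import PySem

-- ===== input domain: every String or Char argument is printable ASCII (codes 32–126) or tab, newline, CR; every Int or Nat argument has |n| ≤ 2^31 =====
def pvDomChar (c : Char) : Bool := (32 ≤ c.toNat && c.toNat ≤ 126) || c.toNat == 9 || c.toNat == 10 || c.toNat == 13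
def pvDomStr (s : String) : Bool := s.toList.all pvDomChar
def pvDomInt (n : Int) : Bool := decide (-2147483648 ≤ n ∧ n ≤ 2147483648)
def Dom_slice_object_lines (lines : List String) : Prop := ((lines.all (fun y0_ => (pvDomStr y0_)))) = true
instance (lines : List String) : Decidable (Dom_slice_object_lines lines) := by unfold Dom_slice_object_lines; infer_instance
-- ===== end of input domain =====

-- B simplifies A by computing the boundary index of the first stop marker at or after
-- start+11 and returning one slice, instead of A's per-element append loop.

def pvStops : List String := ["Recently viewed", "Objects", "Collections", "Similar"]

-- ===== PORT A =====
-- first enumerate-loop of A: index of the first line equal to "Object"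
def pvFindObject : List String → Nat → Option Nat
  | [], _ => none
  | l :: ls, i => if l == "Object" then some i else pvFindObject ls (i + 1)

-- second loop of A: accumulate into result, breaking on a stop marker once len(result) > 10
def pvAccum : List String → List String → List String
  | [], result => result
  | l :: ls, result =>
    if pvStops.contains l && decide (result.length > 10) then result
    else pvAccum ls (result ++ [l])

def slice_object_lines (lines : List String) : List String :=
  match pvFindObject lines 0 with
  | none => lines
  | some start => pvAccum (lines.drop start) []   -- lines[start:] with 0 ≤ start: exact

-- ===== PORT B =====
-- scan for the first stop marker, carrying the absolute index j
def pvScanStop : List String → Nat → Option Nat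
  | [], _ => none
  | l :: ls, j => if pvStops.contains l then some j else pvScanStop ls (j + 1)

def slice_object_lines_alt (lines : List String) : List String :=
  match lines.findIdx? (· == "Object") with   -- next((i for i, line in enumerate(lines) if line == "Object"), None)
  | none => lines
  | some start =>
    match pvScanStop (lines.drop (start + 11)) (start + 11) with  -- range(start+11, len(lines))
    | none => lines.drop start                                    -- lines[start:]
    | some j => (lines.take j).drop start                         -- lines[start:j], 0 ≤ start ≤ j: exact

-- ===== PRECONDITION & SPEC =====
def Spec_slice_object_lines (lines : List String) (out : List String) : Prop := out = slice_object_lines_alt lines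
instance (lines : List String) (out : List String) : Decidable (Spec_slice_object_lines lines out) := by unfold Spec_slice_object_lines; infer_instance

-- ===== CLAIM (what is proved, stated in full; the proofs are below) =====
def Claim_equal_slice_object_lines : Prop := ∀ (lines : List String), Dom_slice_object_lines lines → Spec_slice_object_lines lines (slice_object_lines lines)

-- ===== LEMMAS AND PROOFS =====

-- A's accumulate loop with counter made explicit
def pvTakeF : List String → Nat → List String
  | [], _ => []
  | l :: ls, k => if pvStops.contains l && decide (k > 10) then [] else l :: pvTakeF ls (k + 1)

-- stop-marker cutoff with no counter
def pvCut : List String → List String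
  | [] => []
  | l :: ls => if pvStops.contains l then [] else l :: pvCut ls

theorem pvFindObject_eq (ls : List String) (i : Nat) :
    pvFindObject ls i = (ls.findIdx? (· == "Object")).map (· + i) := by
  induction ls generalizing i with
  | nil => rfl
  | cons l ls ih =>
    simp only [pvFindObject, List.findIdx?_cons]
    by_cases h : l == "Object"
    · simp [h]
    · simp only [h, if_false, ih (i + 1), Bool.false_eq_true]
      cases hf : ls.findIdx? (· == "Object") with
      | none => simp
      | some m => simp; omega

theorem pvAccum_eq (t acc : List String) :
    pvAccum t acc = acc ++ pvTakeF t acc.length := by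
  induction t generalizing acc with
  | nil => simp [pvAccum, pvTakeF]
  | cons l ls ih =>
    simp only [pvAccum, pvTakeF, ih (acc ++ [l])]
    split_ifs with h
    · simp
    · simp

theorem pvTakeF_eq (t : List String) (k : Nat) :
    pvTakeF t k = t.take (11 - k) ++ pvCut (t.drop (11 - k)) := by
  induction t generalizing k with
  | nil => simp [pvTakeF, pvCut]
  | cons l ls ih =>
    by_cases hk : k > 10
    · have h11 : 11 - k = 0 := by omega
      have h11' : 11 - (k + 1) = 0 := by omega
      have hih := ih (k + 1)
      rw [h11'] at hih
      simp only [pvTakeF, pvCut, h11, List.take_zero, List.drop_zero, List.nil_append, hih, hk,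
        decide_true, Bool.and_true]
    · have h11 : 11 - k = (11 - (k + 1)) + 1 := by omega
      simp only [pvTakeF, hk, decide_false, Bool.and_false, Bool.false_eq_true, if_false,
        h11, List.take_succ_cons, List.drop_succ_cons, List.cons_append]
      exact congrArg _ (ih (k + 1))

theorem pvScanStop_ge (s : List String) (j m : Nat) (h : pvScanStop s j = some m) : j ≤ m := by
  induction s generalizing j with
  | nil => simp [pvScanStop] at h
  | cons l ls ih =>
    rw [pvScanStop] at h
    by_cases hs : pvStops.contains l
    · rw [if_pos hs] at h
      injection h with h; omega
    · rw [if_neg hs] at h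
      have := ih (j + 1) h; omega

theorem pvCut_eq_scan (s : List String) (j : Nat) :
    pvCut s = match pvScanStop s j with
              | none => s
              | some m => s.take (m - j) := by
  induction s generalizing j with
  | nil => simp [pvCut, pvScanStop]
  | cons l ls ih =>
    rw [pvCut, pvScanStop]
    by_cases hs : pvStops.contains l
    · rw [if_pos hs, if_pos hs]
      simp
    · rw [if_neg hs, if_neg hs]
      cases hsc : pvScanStop ls (j + 1) with
      | none =>
        have := ih (j + 1)
        rw [hsc] at this
        simp [this]
      | some m =>
        have hm : j + 1 ≤ m := pvScanStop_ge ls (j + 1) m hsc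
        have := ih (j + 1)
        rw [hsc] at this
        have hmj : m - j = (m - (j + 1)) + 1 := by omega
        simp [this, hmj]

theorem slice_object_lines_spec : Claim_equal_slice_object_lines := by
  intro lines _
  unfold Spec_slice_object_lines slice_object_lines slice_object_lines_alt
  rw [show pvFindObject lines 0 = (lines.findIdx? (· == "Object")).map (· + 0) from
    pvFindObject_eq lines 0]
  cases hf : lines.findIdx? (· == "Object") with
  | none => simp
  | some start =>
    simp only [Option.map_some, Nat.add_zero]
    set t := lines.drop start with ht
    have hdrop : lines.drop (start + 11) = t.drop 11 := by
      rw [ht, List.drop_drop]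
    rw [pvAccum_eq, List.nil_append, List.length_nil, pvTakeF_eq, Nat.sub_zero, hdrop,
      pvCut_eq_scan (t.drop 11) (start + 11)]
    cases hsc : pvScanStop (t.drop 11) (start + 11) with
    | none => simp
    | some j =>
      have hj : start + 11 ≤ j := pvScanStop_ge _ _ _ hsc
      show List.take 11 t ++ List.take (j - (start + 11)) (List.drop 11 t)
          = List.drop start (List.take j lines)
      rw [List.drop_take, ← ht]
      have : j - start = 11 + (j - (start + 11)) := by omega
      rw [this, List.take_add]
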